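-- pv_equiv track=rewrite | github.com/SahitiSarva/Susquehanna | notebooks/utilities.py | get_formatted_decisions
-- ===== SOURCE A (Python) =====
-- def get_formatted_decisions(stable_decisions, nr_decisions = 2):
--     decisions = []
--     for i in range(0, len(stable_decisions), nr_decisions):
--         if i+nr_decisions+1 == len(stable_decisions):
--             decisions.append(stable_decisions[i:i+nr_decisions+1])
--             break
--         else:
--             decisions.append(stable_decisions[i:i+nr_decisions])
--     return decisions
-- ===== SOURCE B (Python) =====
-- def get_formatted_decisions(stable_decisions, nr_decisions=2):
--     # Arithmetic-first, back-to-front: compute the final chunk's size in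
--     # closed form, then peel fixed-size chunks off the END of the prefix
--     # with a while loop, and reverse.
--     n = len(stable_decisions)
--     if nr_decisions <= 0 or n == 0:
--         return []
--     if n > nr_decisions and (n - 1) % nr_decisions == 0:
--         tail = nr_decisions + 1          # lone trailing element gets absorbed
--     elif n % nr_decisions != 0:
--         tail = n % nr_decisions
--     else:
--         tail = min(n, nr_decisions)
--     out = [stable_decisions[n - tail:]]
--     i = n - tail
--     while i > 0:
--         out.append(stable_decisions[i - nr_decisions:i])
--         i -= nr_decisions
--     out.reverse()
--     return out
-- ===== Notes on version B (the rewrite author's own statement) =====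
-- stated objective: alternative
-- what changed: A's front-to-back stride loop with an in-loop lookahead test and break is replaced by an arithmetic-first strategy: B computes the size of the final (possibly merged) chunk in closed form from len and nr_decisions, then peels fixed-size chunks off the END of the remaining prefix with a while loop and reverses.
import Mathlib
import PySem

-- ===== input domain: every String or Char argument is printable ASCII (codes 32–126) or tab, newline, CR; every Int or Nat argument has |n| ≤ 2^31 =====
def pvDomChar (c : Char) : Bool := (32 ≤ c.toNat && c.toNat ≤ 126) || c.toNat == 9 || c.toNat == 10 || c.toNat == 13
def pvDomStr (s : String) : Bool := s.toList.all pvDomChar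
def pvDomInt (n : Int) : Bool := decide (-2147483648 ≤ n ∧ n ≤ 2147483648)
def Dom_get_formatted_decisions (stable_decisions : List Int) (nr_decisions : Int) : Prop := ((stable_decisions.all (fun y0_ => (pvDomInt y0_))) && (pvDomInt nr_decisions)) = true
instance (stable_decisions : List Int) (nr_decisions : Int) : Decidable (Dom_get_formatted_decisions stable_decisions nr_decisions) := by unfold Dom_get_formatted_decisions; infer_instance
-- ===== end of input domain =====

-- B replaces A's front-to-back stride loop (lookahead test + conditional break) by an
-- arithmetic-first strategy: it computes the final chunk's size in closed form, then peels
-- fixed-size chunks off the END of the remaining prefix and reverses; objective: alternative.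

-- ===== PORT A =====
-- the for-loop with its conditional break, recursing over the range list
def pvGoA (s : List Int) (nr : Int) (R : List Int) (acc : List (List Int)) : List (List Int) :=
  match R with
  | [] => acc
  | i :: rest =>
    if i + nr + 1 = (s.length : Int) then
      acc ++ [PySem.List.slice s (some i) (some (i + nr + 1))]
    else
      pvGoA s nr rest (acc ++ [PySem.List.slice s (some i) (some (i + nr))])

def get_formatted_decisions (stable_decisions : List Int) (nr_decisions : Int) : List (List Int) :=
  pvGoA stable_decisions nr_decisions
    (PySem.List.pyRange 0 (stable_decisions.length : Int) nr_decisions) []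

-- ===== PORT B =====
-- the if/elif/else computing the final chunk's size
def pvTail (n nr : Int) : Int :=
  if nr < n ∧ PySem.Int.mod (n - 1) nr = 0 then nr + 1
  else if PySem.Int.mod n nr ≠ 0 then PySem.Int.mod n nr
  else min n nr

-- the while loop: peel chunks off the end (the 0 < nr conjunct only makes the
-- recursion total; B's loop is reached only with a positive chunk size)
def pvGoB (s : List Int) (nr : Int) (i : Int) (out : List (List Int)) : List (List Int) :=
  if h : 0 < i ∧ 0 < nr then
    pvGoB s nr (i - nr) (out ++ [PySem.List.slice s (some (i - nr)) (some i)])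
  else out
termination_by i.toNat
decreasing_by omega

def get_formatted_decisions_alt (stable_decisions : List Int) (nr_decisions : Int) : List (List Int) :=
  if nr_decisions ≤ 0 ∨ (stable_decisions.length : Int) = 0 then []
  else
    (pvGoB stable_decisions nr_decisions
        ((stable_decisions.length : Int) - pvTail (stable_decisions.length : Int) nr_decisions)
        [PySem.List.slice stable_decisions
          (some ((stable_decisions.length : Int) - pvTail (stable_decisions.length : Int) nr_decisions)) none]).reverse

-- ===== PRECONDITION & SPEC =====
-- Python's range raises ValueError for a zero step, so A raises iff nr_decisions = 0.
def Pre_get_formatted_decisions (stable_decisions : List Int) (nr_decisions : Int) : Prop :=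
  nr_decisions ≠ 0
instance (stable_decisions : List Int) (nr_decisions : Int) : Decidable (Pre_get_formatted_decisions stable_decisions nr_decisions) := by unfold Pre_get_formatted_decisions; infer_instance

def pvWitness_get_formatted_decisions : List Int × Int := ([1, 2, 3, 4, 5], 2)

def Spec_get_formatted_decisions (stable_decisions : List Int) (nr_decisions : Int) (out : List (List Int)) : Prop := out = get_formatted_decisions_alt stable_decisions nr_decisions
instance (stable_decisions : List Int) (nr_decisions : Int) (out : List (List Int)) : Decidable (Spec_get_formatted_decisions stable_decisions nr_decisions out) := by unfold Spec_get_formatted_decisions; infer_instance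

-- ===== CLAIM (what is proved, stated in full; the proofs are below) =====
def Claim_equal_get_formatted_decisions : Prop := ∀ (stable_decisions : List Int) (nr_decisions : Int), Dom_get_formatted_decisions stable_decisions nr_decisions → Pre_get_formatted_decisions stable_decisions nr_decisions → Spec_get_formatted_decisions stable_decisions nr_decisions (get_formatted_decisions stable_decisions nr_decisions)

-- ===== LEMMAS AND PROOFS =====

theorem pvGoA_no_fire (s : List Int) (nr : Int) (R : List Int) (acc : List (List Int))
    (h : ∀ i ∈ R, i + nr + 1 ≠ (s.length : Int)) :
    pvGoA s nr R acc = acc ++ R.map (fun i => PySem.List.slice s (some i) (some (i + nr))) := by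
  induction R generalizing acc with
  | nil => simp [pvGoA]
  | cons i rest ih =>
    have hi : i + nr + 1 ≠ (s.length : Int) := h i (by simp)
    simp only [pvGoA, if_neg hi, List.map_cons]
    rw [ih _ (fun j hj => h j (by simp [hj]))]
    simp

theorem pvGoA_fire (s : List Int) (nr : Int) (P : List Int) (i0 : Int) (rest : List Int)
    (acc : List (List Int))
    (hP : ∀ i ∈ P, i + nr + 1 ≠ (s.length : Int)) (hi : i0 + nr + 1 = (s.length : Int)) :
    pvGoA s nr (P ++ i0 :: rest) acc
      = acc ++ P.map (fun i => PySem.List.slice s (some i) (some (i + nr)))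
          ++ [PySem.List.slice s (some i0) (some (i0 + nr + 1))] := by
  induction P generalizing acc with
  | nil => simp [pvGoA, if_pos hi]
  | cons j P' ih =>
    have hj : j + nr + 1 ≠ (s.length : Int) := hP j (by simp)
    simp only [List.cons_append, pvGoA, if_neg hj, List.map_cons]
    rw [ih _ (fun x hx => hP x (by simp [hx]))]
    simp

theorem pvRange_neg_nil (b nr : Int) (h : nr < 0) (hb : 0 ≤ b) :
    PySem.List.pyRange 0 b nr = [] := by
  unfold PySem.List.pyRange
  rw [if_neg h.ne]
  have h1 : ¬ (0:Int) < nr := by omega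
  have h2 : ¬ b < 0 := by omega
  simp [h1, h2]

-- a slice whose stop bound reaches past the end is a slice to the end
theorem pvSliceEnd (s : List Int) (a b : Int) (ha : 0 ≤ a) (hb : (s.length : Int) ≤ b) :
    PySem.List.slice s (some a) (some b) = PySem.List.slice s (some a) none := by
  have hb0 : (0 : Int) ≤ b := le_trans (by positivity) hb
  rw [PySem.List.slice_toNat _ ha hb0, PySem.List.slice_from _ ha]
  apply List.take_of_length_le
  simp only [List.length_drop]
  omega

-- the while loop peels the first t chunks, in descending order
theorem pvGoB_mul (s : List Int) (nr : Int) (hnr : 0 < nr) (t : Nat) (out : List (List Int)) :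
    pvGoB s nr (nr * (t : Int)) out
      = out ++ ((List.range t).reverse.map
          (fun (k : Nat) => PySem.List.slice s (some (nr * (k : Int))) (some (nr * (k : Int) + nr)))) := by
  induction t generalizing out with
  | zero => simp [pvGoB]
  | succ t ih =>
    have h0 : (0 : Int) ≤ nr * (t : Int) := mul_nonneg hnr.le (Int.natCast_nonneg t)
    have hc : nr * ((t + 1 : Nat) : Int) = nr * (t : Int) + nr := by push_cast; ring
    rw [pvGoB, dif_pos ⟨by omega, hnr⟩]
    rw [show nr * ((t + 1 : Nat) : Int) - nr = nr * (t : Int) from by push_cast; ring, hc, ih]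
    simp [List.range_succ]

theorem pvRevMap {α β : Type} (l : List α) (g : α → β) :
    ((l.reverse.map g)).reverse = l.map g := by
  simp

theorem pvMain (s : List Int) (nr : Int) (hnr : nr ≠ 0) :
    get_formatted_decisions s nr = get_formatted_decisions_alt s nr := by
  unfold get_formatted_decisions get_formatted_decisions_alt
  rcases lt_or_gt_of_ne hnr with hneg | hpos
  · rw [pvRange_neg_nil _ _ hneg (by positivity), if_pos (Or.inl hneg.le)]
    simp [pvGoA]
  · by_cases hN0 : s.length = 0
    · rw [if_pos (Or.inr (by exact_mod_cast hN0)), PySem.List.pyRange_of_pos 0 _ hpos]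
      simp [hN0, pvGoA]
    · have hN : (0 : Int) < (s.length : Int) := by exact_mod_cast Nat.pos_of_ne_zero hN0
      rw [if_neg (by push_neg; exact ⟨by omega, by omega⟩)]
      rw [PySem.List.pyRange_of_pos 0 _ hpos, if_pos (by omega)]
      set N : Int := (s.length : Int) with hNdef
      rw [show N - 0 + nr - 1 = N + nr - 1 from by ring]
      set q : Int := (N + nr - 1) / nr with hq
      have hchar : q * nr ≤ N + nr - 1 ∧ N + nr - 1 < (q + 1) * nr := by
        refine (PySem.Int.floordiv_eq_iff_of_pos hpos).mp ?_
        rw [PySem.Int.floordiv_eq_ediv_of_pos hpos]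
      have hq1 : 1 ≤ q := by nlinarith [hchar.1, hchar.2]
      have hlo : nr * (q - 1) < N := by nlinarith [hchar.1]
      have hhi : N ≤ nr * q := by nlinarith [hchar.2]
      have hmq : ((q.toNat : Nat) : Int) = q := Int.toNat_of_nonneg (by omega)
      -- B's arithmetic fire test ↔ A's break condition firing (at index q-2)
      have hFiff : (nr < N ∧ PySem.Int.mod (N - 1) nr = 0) ↔ (N = nr * (q - 1) + 1 ∧ 2 ≤ q) := by
        constructor
        · rintro ⟨hlt, hm⟩
          obtain ⟨m, hmm⟩ := (PySem.Int.mod_eq_zero_iff_dvd _ _).mp hm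
          have hm1 : 1 ≤ m := by nlinarith
          have e1 : q - 1 ≤ m := by nlinarith
          have e2 : m ≤ q - 1 := by nlinarith
          have hqm : m = q - 1 := le_antisymm e2 e1
          refine ⟨by rw [← hqm]; linarith, by omega⟩
        · rintro ⟨hfn, hq2⟩
          refine ⟨by nlinarith, (PySem.Int.mod_eq_zero_iff_dvd _ _).mpr ⟨q - 1, by linarith⟩⟩
      by_cases hf : N = nr * (q - 1) + 1 ∧ 2 ≤ q
      · -- FIRE: the trailing element is absorbed into a final chunk of nr+1
        have ht : ((q.toNat - 2 : Nat) : Int) = q - 2 := by omega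
        have htail : pvTail N nr = nr + 1 := by
          unfold pvTail; rw [if_pos (hFiff.mpr hf)]
        have hm0 : N - (nr + 1) = nr * ((q.toNat - 2 : Nat) : Int) := by
          rw [ht]; linear_combination hf.1
        have hsplit : List.range q.toNat
            = (List.range (q.toNat - 2) ++ [q.toNat - 2]) ++ [q.toNat - 2 + 1] := by
          conv_lhs => rw [show q.toNat = (q.toNat - 2) + 1 + 1 from by omega,
            List.range_succ, List.range_succ]
        rw [hsplit]
        simp only [List.map_append, List.map_cons, List.map_nil, List.append_assoc,
          List.singleton_append]
        rw [ht, show ((q.toNat - 2 + 1 : Nat) : Int) = q - 1 from by omega]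
        have hP : ∀ i ∈ (List.range (q.toNat - 2)).map (fun (k : Nat) => 0 + nr * (k : Int)),
            i + nr + 1 ≠ N := by
          intro i hi heq
          simp only [List.mem_map, List.mem_range] at hi
          obtain ⟨k, hk, rfl⟩ := hi
          have hNk : nr * ((k : Int) + 1) = nr * (q - 1) := by linarith [hf.1]
          have := mul_left_cancel₀ (ne_of_gt hpos) hNk
          omega
        have hi0 : (0 + nr * (q - 2)) + nr + 1 = N := by linear_combination -hf.1
        rw [pvGoA_fire s nr _ _ _ _ hP hi0, List.nil_append, List.map_map]
        rw [htail, hm0, pvGoB_mul s nr hpos]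
        rw [List.reverse_append]
        simp only [List.reverse_cons, List.reverse_nil, List.nil_append]
        rw [pvRevMap]
        congr 1
        · exact List.map_congr_left (fun k _ => by simp)
        · rw [ht, zero_add,
            pvSliceEnd s (nr * (q - 2)) _ (mul_nonneg hpos.le (by omega)) (by linarith [hi0])]
      · -- NO FIRE: the last chunk is just the remainder (or a full chunk)
        have hnf : ¬ (nr < N ∧ PySem.Int.mod (N - 1) nr = 0) := fun hc => hf (hFiff.mp hc)
        have hdm : nr * (N / nr) + N % nr = N := Int.ediv_add_emod N nr
        have hr0 : 0 ≤ N % nr := Int.emod_nonneg N (by omega)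
        have hrlt : N % nr < nr := Int.emod_lt_of_pos N hpos
        have ht : ((q.toNat - 1 : Nat) : Int) = q - 1 := by omega
        have htail : N - pvTail N nr = nr * ((q.toNat - 1 : Nat) : Int) := by
          unfold pvTail
          rw [if_neg hnf, PySem.Int.mod_eq_emod_of_pos hpos, ht]
          by_cases hr : N % nr = 0
          · rw [if_neg (by omega)]
            have hd1 : 1 ≤ N / nr := by nlinarith [hdm]
            have hnrN : nr ≤ N := by nlinarith [hdm]
            rw [min_eq_right hnrN]
            have e1 : N / nr ≤ q := by nlinarith [hdm]
            have e2 : q ≤ N / nr := by nlinarith [hdm]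
            have hdq : N / nr = q := le_antisymm e1 e2
            rw [hdq] at hdm
            linear_combination hr - hdm
          · rw [if_pos hr]
            have hr1 : 1 ≤ N % nr := by omega
            have e1 : N / nr ≤ q - 1 := by nlinarith [hdm, hr1, hhi]
            have e2 : q - 1 ≤ N / nr := by nlinarith [hdm, hrlt, hlo]
            have hdq : N / nr = q - 1 := le_antisymm e1 e2
            rw [hdq] at hdm
            linear_combination -hdm
        have hnof : ∀ i ∈ (List.range q.toNat).map (fun (k : Nat) => 0 + nr * (k : Int)),
            i + nr + 1 ≠ N := by
          intro i hi heq
          simp only [List.mem_map, List.mem_range] at hi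
          obtain ⟨k, hk, rfl⟩ := hi
          have e1 : q - 1 ≤ (k : Int) + 1 := by nlinarith
          have e2 : (k : Int) + 1 ≤ q - 1 := by nlinarith
          exact hf ⟨by linear_combination nr * (le_antisymm e2 e1) - heq, by omega⟩
        rw [pvGoA_no_fire s nr _ _ hnof, List.nil_append, List.map_map]
        rw [htail, pvGoB_mul s nr hpos]
        rw [List.reverse_append]
        simp only [List.reverse_cons, List.reverse_nil, List.nil_append]
        rw [pvRevMap]
        rw [show q.toNat = (q.toNat - 1) + 1 from by omega, List.range_succ, List.map_append]
        simp only [List.map_cons, List.map_nil]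
        congr 1
        · exact List.map_congr_left (fun k _ => by simp)
        · simp only [Function.comp_apply, Nat.add_sub_cancel]
          rw [ht, zero_add,
            pvSliceEnd s (nr * (q - 1)) _ (mul_nonneg hpos.le (by omega)) (by nlinarith)]

-- ===== VERDICT (by name: the statement is the Claim_ definition above) =====
theorem get_formatted_decisions_spec : Claim_equal_get_formatted_decisions := by
  intro s nr _ hnr
  unfold Spec_get_formatted_decisions
  exact pvMain s nr hnr
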